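-- pv_equiv track=rewrite | github.com/RideGreg/LeetCode | Python/escape-a-large-maze.py | isEscapePossible_lee215
-- ===== SOURCE A (Python) =====
-- def isEscapePossible_lee215(blocked, source, target):
--     blocked = {tuple(p) for p in blocked}
--
--     def bfs(source, target):
--         bfs, seen = [source], {tuple(source)}
--         for x0, y0 in bfs:
--             for i, j in [[0, 1], [1, 0], [-1, 0], [0, -1]]:
--                 x, y = x0 + i, y0 + j
--                 if 0 <= x < 10**6 and 0 <= y < 10**6 and (x, y) not in seen and (x, y) not in blocked:
--                     if [x, y] == target: return True
--                     bfs.append([x, y])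
--                     seen.add((x, y))
--             if len(bfs) > len(blocked)*(len(blocked)-1)//2:
--                 return True
--         return False
--     return bfs(source, target) and bfs(target, source)
-- ===== SOURCE B (Python) =====
-- def isEscapePossible_lee215(blocked, source, target):
--     blocked_set = {tuple(p) for p in blocked}
--     cap = len(blocked_set) * (len(blocked_set) - 1) // 2
--     sx, sy = source
--     tx, ty = target
--
--     def dfs(sx, sy, tx, ty):
--         seen = {(sx, sy)}
--         stack = [(sx, sy)]
--         while stack:
--             x, y = stack.pop()
--             for n in ((x, y - 1), (x, y + 1), (x - 1, y), (x + 1, y)):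
--                 if 0 <= n[0] < 10**6 and 0 <= n[1] < 10**6 and n not in blocked_set and n not in seen:
--                     if n == (tx, ty):
--                         return True
--                     seen.add(n)
--                     stack.append(n)
--             if cap < len(seen):
--                 return True
--         return False
--
--     return dfs(sx, sy, tx, ty) and dfs(tx, ty, sx, sy)
-- ===== Notes on version B (the rewrite author's own statement) =====
-- stated objective: alternative
-- what changed: Replaces A's BFS over an index-scanned, ever-growing queue list (re-testing len(bfs) against the area bound after each node) by an explicit stack-based DFS with a separate seen set: pop the last cell, push unseen in-grid unblocked neighbours, compare the seen count against len(blocked)*(len(blocked)-1)//2; the result is traversal-order independent.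
-- outside the precondition, e.g. on isEscapePossible_lee215([[0, 2], [1, 1], [2, 0]], [0, 0], [0]): A returns False, B raises ValueError; on isEscapePossible_lee215([[0, 0], [1, 1]], [-5, -5], [1, 2, 3]): A returns False, B raises ValueError
import Mathlib
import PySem

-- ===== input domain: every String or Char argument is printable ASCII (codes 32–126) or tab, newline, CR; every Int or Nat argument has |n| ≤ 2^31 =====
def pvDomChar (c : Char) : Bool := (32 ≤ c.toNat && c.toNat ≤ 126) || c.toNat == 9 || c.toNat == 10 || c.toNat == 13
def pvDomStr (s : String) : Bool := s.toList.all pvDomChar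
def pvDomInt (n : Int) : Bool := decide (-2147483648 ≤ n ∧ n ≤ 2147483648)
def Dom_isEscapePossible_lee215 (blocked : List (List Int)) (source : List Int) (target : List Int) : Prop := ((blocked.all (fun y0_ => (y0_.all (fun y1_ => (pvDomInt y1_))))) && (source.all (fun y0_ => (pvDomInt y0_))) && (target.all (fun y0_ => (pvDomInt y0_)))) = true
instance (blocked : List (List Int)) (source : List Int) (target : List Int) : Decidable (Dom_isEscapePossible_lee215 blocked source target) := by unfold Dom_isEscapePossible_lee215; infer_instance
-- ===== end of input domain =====

-- B replaces A's index-scanned growing BFS queue by an explicit stack-based DFS with a separate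
-- seen set (alternative traversal of the same region; same exact return value).

-- ===== PORT A =====
-- the Python guard `0 <= x < 10**6 and 0 <= y < 10**6`
def pvInGridA (x y : Int) : Bool :=
  decide (0 ≤ x) && decide (x < 1000000) && decide (0 ≤ y) && decide (y < 1000000)

-- the literal direction list `[[0, 1], [1, 0], [-1, 0], [0, -1]]`
def pvDirsA : List (Int × Int) := [(0, 1), (1, 0), (-1, 0), (0, -1)]

-- A's inner `for i, j in [...]` loop over the four offsets: appends new cells to the queue (`bfs`)
-- and to `seen`; `none` = `return True` (target found). Under Pre_ the target is the pair
-- (tx, ty), so Python's `[x, y] == target` is exactly `x = tx ∧ y = ty`.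
def innerA (blockedS : List (List Int)) (tx ty x0 y0 : Int) :
    List (Int × Int) → List (Int × Int) → List (Int × Int) →
    Option (List (Int × Int) × List (Int × Int))
  | [], queue, seen => some (queue, seen)
  | (i, j) :: rest, queue, seen =>
    let x := x0 + i
    let y := y0 + j
    if pvInGridA x y && !(seen.contains (x, y)) && !(blockedS.contains [x, y]) then
      if x = tx ∧ y = ty then none
      else innerA blockedS tx ty x0 y0 rest (queue ++ [(x, y)]) (seen ++ [(x, y)])
    else innerA blockedS tx ty x0 y0 rest queue seen

-- A's `for x0, y0 in bfs:` — Python iterates the growing list by index i; the fuel argument only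
-- makes the recursion structural (the loop runs at most bound + 1 iterations, see loopA_complete).
def loopA (blockedS : List (List Int)) (tx ty : Int) (bound : Nat) :
    Nat → List (Int × Int) → List (Int × Int) → Nat → Bool
  | 0, _, _, _ => true
  | fuel + 1, queue, seen, i =>
    match queue[i]? with
    | none => false
    | some (x0, y0) =>
      match innerA blockedS tx ty x0 y0 pvDirsA queue seen with
      | none => true
      | some (queue', seen') =>
        if queue'.length > bound then true
        else loopA blockedS tx ty bound fuel queue' seen' (i + 1)

def isEscapePossible_lee215 (blocked : List (List Int)) (source : List Int) (target : List Int) : Bool :=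
  let blockedS : PySem.Set (List Int) := PySem.Set.ofList blocked
  let bound : Nat := blockedS.length * (blockedS.length - 1) / 2
  match source, target with
  | [sx, sy], [tx, ty] =>
      loopA blockedS tx ty bound (bound + 2) [(sx, sy)] [(sx, sy)] 0 &&
      loopA blockedS sx sy bound (bound + 2) [(tx, ty)] [(tx, ty)] 0
  | _, _ => false   -- Python raises here (unpack of a non-pair); excluded by Pre_

-- ===== PORT B =====
-- B's scan of the four neighbours of the popped cell: each accepted neighbour is pushed onto the
-- stack and consed into the seen set; `none` = `return True` (the neighbour is the goal).
def altScan (blk : List (List Int)) (goal : Int × Int) :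
    List (Int × Int) → List (Int × Int) → List (Int × Int) →
    Option (List (Int × Int) × List (Int × Int))
  | [], st, sn => some (st, sn)
  | n :: ns, st, sn =>
    if decide (0 ≤ n.1 ∧ n.1 < 1000000 ∧ 0 ≤ n.2 ∧ n.2 < 1000000) &&
       !(blk.contains [n.1, n.2]) && !(sn.contains n) then
      if n = goal then none
      else altScan blk goal ns (n :: st) (n :: sn)
    else altScan blk goal ns st sn

-- B's `while stack:` DFS driver; Python's append/pop at the END of the list = cons/uncons at the
-- head here. The fuel argument only makes the recursion structural (see altDfs_complete).
def altDfs (blk : List (List Int)) (goal : Int × Int) (cap : Nat) :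
    Nat → List (Int × Int) → List (Int × Int) → Bool
  | 0, _, _ => true
  | f + 1, st, sn =>
    match st with
    | [] => false
    | c :: st' =>
      match altScan blk goal [(c.1, c.2 - 1), (c.1, c.2 + 1), (c.1 - 1, c.2), (c.1 + 1, c.2)] st' sn with
      | none => true
      | some (st'', sn') =>
        if cap < sn'.length then true else altDfs blk goal cap f st'' sn'

def isEscapePossible_lee215_alt (blocked : List (List Int)) (source : List Int) (target : List Int) : Bool :=
  let blk : PySem.Set (List Int) := PySem.Set.ofList blocked
  let cap : Nat := blk.length * (blk.length - 1) / 2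
  -- `sx, sy = source` and `tx, ty = target`: exact for pairs; Python raises on non-pairs
  -- (those inputs are excluded by Pre_, so the else-value is never claimed)
  if source.length = 2 ∧ target.length = 2 then
    let sx := source.getD 0 0
    let sy := source.getD 1 0
    let tx := target.getD 0 0
    let ty := target.getD 1 0
    altDfs blk (tx, ty) cap (cap + 6) [(sx, sy)] [(sx, sy)] &&
    altDfs blk (sx, sy) cap (cap + 6) [(tx, ty)] [(tx, ty)]
  else false

-- ===== PRECONDITION & SPEC =====
-- Pre_ excludes non-pair source/target: A's tuple unpacking raises ValueError on them (when the
-- target is not a pair A can still return False accidentally, but only if its first search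
-- already failed — those accidental returns are excluded too; see the claim cites).
def Pre_isEscapePossible_lee215 (blocked : List (List Int)) (source : List Int) (target : List Int) : Prop :=
  source.length = 2 ∧ target.length = 2

instance (blocked : List (List Int)) (source : List Int) (target : List Int) : Decidable (Pre_isEscapePossible_lee215 blocked source target) := by unfold Pre_isEscapePossible_lee215; infer_instance

def pvWitness_isEscapePossible_lee215 : List (List Int) × List Int × List Int := ([[0, 0]], [1, 1], [5, 5])

def Spec_isEscapePossible_lee215 (blocked : List (List Int)) (source : List Int) (target : List Int) (out : Bool) : Prop := out = isEscapePossible_lee215_alt blocked source target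
instance (blocked : List (List Int)) (source : List Int) (target : List Int) (out : Bool) : Decidable (Spec_isEscapePossible_lee215 blocked source target out) := by unfold Spec_isEscapePossible_lee215; infer_instance

-- ===== CLAIM (what is proved, stated in full; the proofs are below) =====
def Claim_equal_isEscapePossible_lee215 : Prop := ∀ (blocked : List (List Int)) (source : List Int) (target : List Int), Dom_isEscapePossible_lee215 blocked source target → Pre_isEscapePossible_lee215 blocked source target → Spec_isEscapePossible_lee215 blocked source target (isEscapePossible_lee215 blocked source target)

-- ===== LEMMAS AND PROOFS =====
-- The abstract region both searches explore: cells reachable from sp through in-grid, unblocked,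
-- non-target cells. Each loop returns false iff no reachable cell touches an eligible target AND
-- the region fits under the bound — a traversal-order-independent condition, whence A = B.
def pvOk (c : Int × Int) : Prop := 0 ≤ c.1 ∧ c.1 < 1000000 ∧ 0 ≤ c.2 ∧ c.2 < 1000000
def pvAdj (p q : Int × Int) : Prop :=
  q = (p.1 + 1, p.2) ∨ q = (p.1 - 1, p.2) ∨ q = (p.1, p.2 + 1) ∨ q = (p.1, p.2 - 1)
def pvStep (B : List (List Int)) (tp : Int × Int) (p q : Int × Int) : Prop :=
  pvAdj p q ∧ pvOk q ∧ [q.1, q.2] ∉ B ∧ q ≠ tp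
def pvR (B : List (List Int)) (sp tp : Int × Int) : Set (Int × Int) :=
  {q | Relation.ReflTransGen (pvStep B tp) sp q}

theorem pvInGridA_iff (x y : Int) : pvInGridA x y = true ↔ pvOk (x, y) := by
  simp [pvInGridA, pvOk]; tauto

theorem pvOkB_iff (n : Int × Int) :
    decide (0 ≤ n.1 ∧ n.1 < 1000000 ∧ 0 ≤ n.2 ∧ n.2 < 1000000) = true ↔ pvOk n := by
  simp [pvOk]

theorem pvR_finite (B : List (List Int)) (sp tp : Int × Int) : (pvR B sp tp).Finite := by
  have hok : {c : Int × Int | pvOk c}.Finite := by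
    have hsub : {c : Int × Int | pvOk c} ⊆ (Set.Icc (0:Int) 999999) ×ˢ (Set.Icc (0:Int) 999999) := by
      rintro ⟨x, y⟩ ⟨h1, h2, h3, h4⟩
      constructor <;> simp [Set.mem_Icc] <;> omega
    exact ((Set.finite_Icc _ _).prod (Set.finite_Icc _ _)).subset hsub
  apply (hok.insert sp).subset
  intro q hq
  rcases Relation.ReflTransGen.cases_tail hq with h | ⟨c, _, hstep⟩
  · exact h ▸ Set.mem_insert _ _
  · exact Set.mem_insert_of_mem _ hstep.2.1

theorem pvR_not_tp (B : List (List Int)) (sp tp : Int × Int) (h : tp ≠ sp) : tp ∉ pvR B sp tp := by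
  intro hmem
  rcases Relation.ReflTransGen.cases_tail hmem with h' | ⟨c, _, hstep⟩
  · exact h h'
  · exact hstep.2.2.2 rfl

theorem pvR_card_of_list (B : List (List Int)) (sp tp : Int × Int) (l : List (Int × Int))
    (hnd : l.Nodup) (hsub : ∀ c ∈ l, c ∈ pvR B sp tp) : l.length ≤ (pvR B sp tp).ncard := by
  classical
  have hfin := pvR_finite B sp tp
  calc l.length = l.toFinset.card := (List.toFinset_card_of_nodup hnd).symm
    _ ≤ hfin.toFinset.card := by
        apply Finset.card_le_card
        intro c hc
        rw [Set.Finite.mem_toFinset]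
        exact hsub c (List.mem_toFinset.mp hc)
    _ = (pvR B sp tp).ncard := (Set.ncard_eq_toFinset_card _ hfin).symm

theorem pvAdj_of_dirA (x0 y0 : Int) (d : Int × Int) (hd : d ∈ pvDirsA) :
    pvAdj (x0, y0) (x0 + d.1, y0 + d.2) := by
  fin_cases hd <;> simp [pvAdj, Prod.ext_iff] <;> omega

theorem pvAdj_to_dirA (x0 y0 : Int) (q : Int × Int) (h : pvAdj (x0, y0) q) :
    ∃ d ∈ pvDirsA, q = (x0 + d.1, y0 + d.2) := by
  rcases h with h | h | h | h
  · exact ⟨(1, 0), by simp [pvDirsA], by rw [h]; exact Prod.ext_iff.mpr ⟨by ring, by ring⟩⟩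
  · exact ⟨(-1, 0), by simp [pvDirsA], by rw [h]; exact Prod.ext_iff.mpr ⟨by ring, by ring⟩⟩
  · exact ⟨(0, 1), by simp [pvDirsA], by rw [h]; exact Prod.ext_iff.mpr ⟨by ring, by ring⟩⟩
  · exact ⟨(0, -1), by simp [pvDirsA], by rw [h]; exact Prod.ext_iff.mpr ⟨by ring, by ring⟩⟩

theorem mem_nbrsB (x0 y0 : Int) (q : Int × Int) :
    q ∈ [((x0:Int), y0 - 1), (x0, y0 + 1), (x0 - 1, y0), (x0 + 1, y0)] ↔ pvAdj (x0, y0) q := by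
  constructor
  · intro h
    rcases (by simpa using h : q = (x0,y0-1) ∨ q = (x0,y0+1) ∨ q = (x0-1,y0) ∨ q = (x0+1,y0)) with h|h|h|h <;>
      simp [pvAdj, h]
  · intro h
    rcases h with h|h|h|h <;> simp [h]

theorem innerA_some (blockedS : List (List Int)) (tx ty x0 y0 : Int) :
    ∀ (dirs queue seen q' s' : List (Int × Int)),
      innerA blockedS tx ty x0 y0 dirs queue seen = some (q', s') →
      ∃ new : List (Int × Int),
        q' = queue ++ new ∧ s' = seen ++ new ∧ new.Nodup ∧
        (∀ c ∈ new, c ∉ seen ∧ pvOk c ∧ [c.1, c.2] ∉ blockedS ∧ c ≠ (tx, ty) ∧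
          ∃ d ∈ dirs, c = (x0 + d.1, y0 + d.2)) ∧
        (∀ d ∈ dirs, pvOk (x0 + d.1, y0 + d.2) → [x0 + d.1, y0 + d.2] ∉ blockedS →
          (x0 + d.1, y0 + d.2) ∈ s') := by
  intro dirs
  induction dirs with
  | nil =>
    intro queue seen q' s' h
    simp only [innerA, Option.some.injEq, Prod.mk.injEq] at h
    exact ⟨[], by simp [← h.1], by simp [← h.2], by simp, by simp, by simp⟩
  | cons hd rest ih =>
    obtain ⟨i, j⟩ := hd
    intro queue seen q' s' h
    simp only [innerA] at h
    by_cases hg : (pvInGridA (x0 + i) (y0 + j) && !(seen.contains (x0 + i, y0 + j)) && !(blockedS.contains [x0 + i, y0 + j])) = true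
    · rw [if_pos hg] at h
      by_cases ht : (x0 + i = tx ∧ y0 + j = ty)
      · rw [if_pos ht] at h; exact absurd h (by simp)
      · rw [if_neg ht] at h
        obtain ⟨new', hq, hs, hnd, hprops, hcov⟩ := ih _ _ _ _ h
        have hgm : pvOk (x0 + i, y0 + j) ∧ (x0 + i, y0 + j) ∉ seen ∧ [x0 + i, y0 + j] ∉ blockedS := by
          simp only [Bool.and_eq_true, Bool.not_eq_true'] at hg
          refine ⟨(pvInGridA_iff _ _).mp hg.1.1, ?_, ?_⟩
          · simpa using hg.1.2
          · simpa using hg.2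
        refine ⟨(x0 + i, y0 + j) :: new', by simpa using hq, by simpa using hs, ?_, ?_, ?_⟩
        · refine List.nodup_cons.mpr ⟨?_, hnd⟩
          intro hmem
          exact ((hprops _ hmem).1 (by simp))
        · intro c hc
          rcases List.mem_cons.mp hc with rfl | hc
          · exact ⟨hgm.2.1, hgm.1, hgm.2.2, by simp [Prod.ext_iff]; tauto, ⟨(i, j), by simp, by simp⟩⟩
          · obtain ⟨h1, h2, h3, h4, d, hd, he⟩ := hprops c hc
            exact ⟨fun hm => h1 (by simp [hm]), h2, h3, h4, d, by simp [hd], he⟩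
        · intro d hd hok hnb
          rcases List.mem_cons.mp hd with rfl | hd
          · rw [hs]; simp
          · exact hcov d hd hok hnb
    · rw [if_neg hg] at h
      obtain ⟨new', hq, hs, hnd, hprops, hcov⟩ := ih _ _ _ _ h
      refine ⟨new', hq, hs, hnd, ?_, ?_⟩
      · intro c hc
        obtain ⟨h1, h2, h3, h4, d, hd, he⟩ := hprops c hc
        exact ⟨h1, h2, h3, h4, d, by simp [hd], he⟩
      · intro d hd hok hnb
        rcases List.mem_cons.mp hd with rfl | hd
        · -- guard failed but ok ∧ ∉ B ⇒ already in seen ⊆ s'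
          have hseen : (x0 + i, y0 + j) ∈ seen := by
            simp only [Bool.and_eq_true, Bool.not_eq_true', not_and_or] at hg
            rcases hg with (hg | hg) | hg
            · exact absurd ((pvInGridA_iff _ _).mpr (by simpa using hok)) (by simpa using hg)
            · simpa using hg
            · exact absurd (by simpa using hnb : [x0 + i, y0 + j] ∉ blockedS) (by simpa using hg)
          rw [hs]; simpa using Or.inl hseen
        · exact hcov d hd hok hnb

theorem innerA_none (blockedS : List (List Int)) (tx ty x0 y0 : Int) :
    ∀ (dirs queue seen : List (Int × Int)),
      innerA blockedS tx ty x0 y0 dirs queue seen = none →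
      ∃ d ∈ dirs, pvOk (x0 + d.1, y0 + d.2) ∧ [x0 + d.1, y0 + d.2] ∉ blockedS ∧
        x0 + d.1 = tx ∧ y0 + d.2 = ty ∧ (x0 + d.1, y0 + d.2) ∉ seen := by
  intro dirs
  induction dirs with
  | nil => intro queue seen h; simp [innerA] at h
  | cons hd rest ih =>
    obtain ⟨i, j⟩ := hd
    intro queue seen h
    simp only [innerA] at h
    by_cases hg : (pvInGridA (x0 + i) (y0 + j) && !(seen.contains (x0 + i, y0 + j)) && !(blockedS.contains [x0 + i, y0 + j])) = true
    · rw [if_pos hg] at h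
      simp only [Bool.and_eq_true, Bool.not_eq_true'] at hg
      by_cases ht : (x0 + i = tx ∧ y0 + j = ty)
      · exact ⟨(i, j), by simp, (pvInGridA_iff _ _).mp hg.1.1, by simpa using hg.2, ht.1, ht.2,
          by simpa using hg.1.2⟩
      · rw [if_neg ht] at h
        obtain ⟨d, hd, h1, h2, h3, h4, h5⟩ := ih _ _ h
        exact ⟨d, by simp [hd], h1, h2, h3, h4, fun hm => h5 (by simp [hm])⟩
    · rw [if_neg hg] at h
      obtain ⟨d, hd, h1, h2, h3, h4, h5⟩ := ih _ _ h
      exact ⟨d, by simp [hd], h1, h2, h3, h4, h5⟩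

theorem altScan_some (blk : List (List Int)) (goal : Int × Int) :
    ∀ (nbrs st sn st' sn' : List (Int × Int)),
      altScan blk goal nbrs st sn = some (st', sn') →
      ∃ new : List (Int × Int),
        st' = new ++ st ∧ sn' = new ++ sn ∧ new.Nodup ∧
        (∀ c ∈ new, c ∉ sn ∧ pvOk c ∧ [c.1, c.2] ∉ blk ∧ c ≠ goal ∧ c ∈ nbrs) ∧
        (∀ c ∈ nbrs, pvOk c → [c.1, c.2] ∉ blk → c ∈ sn') := by
  intro nbrs
  induction nbrs with
  | nil =>
    intro st sn st' sn' h
    simp only [altScan, Option.some.injEq, Prod.mk.injEq] at h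
    exact ⟨[], by simp [← h.1], by simp [← h.2], by simp, by simp, by simp⟩
  | cons n ns ih =>
    intro st sn st' sn' h
    simp only [altScan] at h
    by_cases hg : (decide (0 ≤ n.1 ∧ n.1 < 1000000 ∧ 0 ≤ n.2 ∧ n.2 < 1000000) &&
        !(blk.contains [n.1, n.2]) && !(sn.contains n)) = true
    · rw [if_pos hg] at h
      by_cases ht : n = goal
      · rw [if_pos ht] at h; exact absurd h (by simp)
      · rw [if_neg ht] at h
        obtain ⟨new', hst, hsn, hnd, hprops, hcov⟩ := ih _ _ _ _ h
        have hgm : pvOk n ∧ n ∉ sn ∧ [n.1, n.2] ∉ blk := by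
          simp only [Bool.and_eq_true, Bool.not_eq_true'] at hg
          refine ⟨(pvOkB_iff n).mp hg.1.1, by simpa using hg.2, by simpa using hg.1.2⟩
        have hnn : n ∉ new' := fun hm => (hprops n hm).1 (by simp)
        refine ⟨new' ++ [n], by rw [hst]; simp, by rw [hsn]; simp, ?_, ?_, ?_⟩
        · refine (List.nodup_append).mpr ⟨hnd, List.nodup_singleton n, ?_⟩
          intro a ha b hb rfl
          exact hnn (List.mem_singleton.mp hb ▸ ha)
        · intro c hc
          rcases List.mem_append.mp hc with hc | hc
          · obtain ⟨h1, h2, h3, h4, h5⟩ := hprops c hc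
            exact ⟨fun hm => h1 (by simp [hm]), h2, h3, h4, by simp [h5]⟩
          · rcases List.mem_singleton.mp hc with rfl
            exact ⟨hgm.2.1, hgm.1, hgm.2.2, ht, by simp⟩
        · intro c hc hok hnb
          rcases List.mem_cons.mp hc with rfl | hc
          · rw [hsn]; simp
          · exact hcov c hc hok hnb
    · rw [if_neg hg] at h
      obtain ⟨new', hst, hsn, hnd, hprops, hcov⟩ := ih _ _ _ _ h
      refine ⟨new', hst, hsn, hnd, ?_, ?_⟩
      · intro c hc
        obtain ⟨h1, h2, h3, h4, h5⟩ := hprops c hc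
        exact ⟨h1, h2, h3, h4, by simp [h5]⟩
      · intro c hc hok hnb
        rcases List.mem_cons.mp hc with rfl | hc
        · have hseen : c ∈ sn := by
            by_contra hns
            apply hg
            simp only [Bool.and_eq_true, Bool.not_eq_true']
            exact ⟨⟨(pvOkB_iff c).mpr hok, by simpa using hnb⟩, by simpa using hns⟩
          rw [hsn]; exact List.mem_append_right _ hseen
        · exact hcov c hc hok hnb

theorem altScan_none (blk : List (List Int)) (goal : Int × Int) :
    ∀ (nbrs st sn : List (Int × Int)),
      altScan blk goal nbrs st sn = none →
      ∃ c ∈ nbrs, pvOk c ∧ [c.1, c.2] ∉ blk ∧ c = goal ∧ c ∉ sn := by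
  intro nbrs
  induction nbrs with
  | nil => intro st sn h; simp [altScan] at h
  | cons n ns ih =>
    intro st sn h
    simp only [altScan] at h
    by_cases hg : (decide (0 ≤ n.1 ∧ n.1 < 1000000 ∧ 0 ≤ n.2 ∧ n.2 < 1000000) &&
        !(blk.contains [n.1, n.2]) && !(sn.contains n)) = true
    · rw [if_pos hg] at h
      simp only [Bool.and_eq_true, Bool.not_eq_true'] at hg
      by_cases ht : n = goal
      · exact ⟨n, by simp, (pvOkB_iff n).mp hg.1.1, by simpa using hg.1.2, ht, by simpa using hg.2⟩
      · rw [if_neg ht] at h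
        obtain ⟨c, hc, h1, h2, h3, h4⟩ := ih _ _ h
        exact ⟨c, by simp [hc], h1, h2, h3, fun hm => h4 (by simp [hm])⟩
    · rw [if_neg hg] at h
      obtain ⟨c, hc, h1, h2, h3, h4⟩ := ih _ _ h
      exact ⟨c, by simp [hc], h1, h2, h3, h4⟩

theorem loopA_false_sound (B : List (List Int)) (sp : Int × Int) (tx ty : Int) (bound : Nat) :
    ∀ (fuel : Nat) (queue seen : List (Int × Int)) (i : Nat),
      seen = queue → queue.Nodup → (∀ c ∈ queue, c ∈ pvR B sp (tx, ty)) → sp ∈ queue →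
      (0 < i → queue.length ≤ bound) →
      (∀ k, k < i → ∀ (hl : k < queue.length), ∀ q, pvAdj queue[k] q → pvOk q →
          [q.1, q.2] ∉ B → q ∈ queue) →
      loopA B tx ty bound fuel queue seen i = false →
      (¬((tx, ty) ≠ sp ∧ pvOk (tx, ty) ∧ [tx, ty] ∉ B ∧ ∃ p ∈ pvR B sp (tx, ty), pvAdj p (tx, ty)) ∧
        (pvR B sp (tx, ty)).ncard ≤ bound) := by
  intro fuel
  induction fuel with
  | zero =>
    intro queue seen i _ _ _ _ _ _ hfalse
    simp [loopA] at hfalse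
  | succ f ih =>
    intro queue seen i hsq hnd hR hsp hlen hclos hfalse
    subst seen
    rw [loopA] at hfalse
    cases hq : queue[i]? with
    | none =>
      have hil : queue.length ≤ i := List.getElem?_eq_none_iff.mp hq
      have hclosed : ∀ c ∈ queue, ∀ q, pvAdj c q → pvOk q → [q.1, q.2] ∉ B → q ∈ queue := by
        intro c hc q hadj hok hnb
        obtain ⟨k, hk, hkc⟩ := List.getElem_of_mem hc
        exact hclos k (lt_of_lt_of_le hk hil) hk q (hkc ▸ hadj) hok hnb
      have hRsub : ∀ q ∈ pvR B sp (tx, ty), q ∈ queue := by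
        intro q hqR
        induction hqR with
        | refl => exact hsp
        | tail hab hbc ihq => exact hclosed _ ihq _ hbc.1 hbc.2.1 hbc.2.2.1
      constructor
      · rintro ⟨hne, hok, hnb, p, hpR, hadj⟩
        have htq : (tx, ty) ∈ queue := hclosed p (hRsub p hpR) _ hadj hok hnb
        exact pvR_not_tp B sp (tx, ty) hne (hR _ htq)
      · have hpos : 0 < queue.length := List.length_pos_of_mem hsp
        have hb : queue.length ≤ bound := hlen (by omega)
        have hsub : pvR B sp (tx, ty) ⊆ ↑queue.toFinset := fun q hq => by
          simpa using hRsub q hq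
        have h1 := Set.ncard_le_ncard hsub queue.toFinset.finite_toSet
        rw [Set.ncard_coe_finset] at h1
        have h2 : queue.toFinset.card ≤ queue.length := queue.toFinset_card_le
        omega
    | some c =>
      obtain ⟨x0, y0⟩ := c
      rw [hq] at hfalse
      simp only at hfalse
      obtain ⟨hi, hqi⟩ := List.getElem?_eq_some_iff.mp hq
      have hmemi : (x0, y0) ∈ queue := hqi ▸ queue.getElem_mem hi
      cases hinner : innerA B tx ty x0 y0 pvDirsA queue queue with
      | none => rw [hinner] at hfalse; simp at hfalse
      | some p =>
        obtain ⟨q', s'⟩ := p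
        rw [hinner] at hfalse
        simp only at hfalse
        obtain ⟨new, hq', hs', hndnew, hprops, hcov⟩ := innerA_some _ _ _ _ _ _ _ _ _ _ hinner
        by_cases hbnd : q'.length > bound
        · rw [if_pos hbnd] at hfalse; simp at hfalse
        · rw [if_neg hbnd] at hfalse
          subst hq'
          subst hs'
          refine ih _ _ (i + 1) rfl ?_ ?_ ?_ ?_ ?_ hfalse
          · refine (List.nodup_append).mpr ⟨hnd, hndnew, ?_⟩
            intro a ha b hb rfl
            exact (hprops a hb).1 ha
          · intro c hc
            rcases List.mem_append.mp hc with hc | hc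
            · exact hR c hc
            · obtain ⟨h1, h2, h3, h4, d, hd, he⟩ := hprops c hc
              exact Relation.ReflTransGen.tail (hR _ hmemi)
                ⟨he ▸ pvAdj_of_dirA x0 y0 d hd, h2, h3, h4⟩
          · exact List.mem_append_left _ hsp
          · intro _
            omega
          · intro k hk hl q hadj hok hnb
            rcases Nat.lt_succ_iff_lt_or_eq.mp hk with hk' | rfl
            · have hkq : k < queue.length := lt_trans hk' hi
              rw [List.getElem_append_left hkq] at hadj
              exact List.mem_append_left _ (hclos k hk' hkq q hadj hok hnb)
            · rw [List.getElem_append_left hi, hqi] at hadj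
              obtain ⟨d, hd, he⟩ := pvAdj_to_dirA x0 y0 q hadj
              subst he
              exact hcov d hd hok hnb

theorem loopA_complete (B : List (List Int)) (sp : Int × Int) (tx ty : Int) (bound : Nat)
    (hQ1 : ¬((tx, ty) ≠ sp ∧ pvOk (tx, ty) ∧ [tx, ty] ∉ B ∧ ∃ p ∈ pvR B sp (tx, ty), pvAdj p (tx, ty)))
    (hQ2 : (pvR B sp (tx, ty)).ncard ≤ bound) :
    ∀ (fuel : Nat) (queue seen : List (Int × Int)) (i : Nat),
      seen = queue → queue.Nodup → (∀ c ∈ queue, c ∈ pvR B sp (tx, ty)) → sp ∈ queue →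
      i ≤ queue.length → bound + 2 - i ≤ fuel →
      loopA B tx ty bound fuel queue seen i = false := by
  intro fuel
  induction fuel with
  | zero =>
    intro queue seen i hsq hnd hR hsp hi hfuel
    have hlen : queue.length ≤ (pvR B sp (tx, ty)).ncard := pvR_card_of_list B sp (tx, ty) queue hnd hR
    omega
  | succ f ih =>
    intro queue seen i hsq hnd hR hsp hi hfuel
    subst seen
    have hlenR : queue.length ≤ (pvR B sp (tx, ty)).ncard := pvR_card_of_list B sp (tx, ty) queue hnd hR
    rw [loopA]
    cases hq : queue[i]? with
    | none => rfl
    | some c =>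
      obtain ⟨x0, y0⟩ := c
      simp only
      obtain ⟨hilt, hqi⟩ := List.getElem?_eq_some_iff.mp hq
      have hmemi : (x0, y0) ∈ queue := hqi ▸ queue.getElem_mem hilt
      cases hinner : innerA B tx ty x0 y0 pvDirsA queue queue with
      | none =>
        exfalso
        obtain ⟨d, hd, hok, hnb, he1, he2, hns⟩ := innerA_none _ _ _ _ _ _ _ _ hinner
        apply hQ1
        refine ⟨?_, ?_, ?_, (x0, y0), hR _ hmemi, ?_⟩
        · intro he
          apply hns
          rw [show ((x0 + d.1, y0 + d.2) : Int × Int) = (tx, ty) from by simp [he1, he2], he]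
          exact hsp
        · rw [show ((tx, ty) : Int × Int) = (x0 + d.1, y0 + d.2) from by simp [Prod.ext_iff]; omega] at *
          exact hok
        · rw [show ([tx, ty] : List Int) = [x0 + d.1, y0 + d.2] from by simp; omega]
          exact hnb
        · rw [show ((tx, ty) : Int × Int) = (x0 + d.1, y0 + d.2) from by simp [Prod.ext_iff]; omega]
          exact pvAdj_of_dirA x0 y0 d hd
      | some p =>
        obtain ⟨q', s'⟩ := p
        simp only
        obtain ⟨new, hq', hs', hndnew, hprops, hcov⟩ := innerA_some _ _ _ _ _ _ _ _ _ _ hinner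
        subst hq'
        subst hs'
        have hnd' : (queue ++ new).Nodup := by
          refine (List.nodup_append).mpr ⟨hnd, hndnew, ?_⟩
          intro a ha b hb rfl
          exact (hprops a hb).1 ha
        have hR' : ∀ c ∈ queue ++ new, c ∈ pvR B sp (tx, ty) := by
          intro c hc
          rcases List.mem_append.mp hc with hc | hc
          · exact hR c hc
          · obtain ⟨h1, h2, h3, h4, d, hd, he⟩ := hprops c hc
            exact Relation.ReflTransGen.tail (hR _ hmemi)
              ⟨he ▸ pvAdj_of_dirA x0 y0 d hd, h2, h3, h4⟩
        have hlen' : (queue ++ new).length ≤ bound :=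
          le_trans (pvR_card_of_list B sp (tx, ty) _ hnd' hR') hQ2
        rw [if_neg (by omega)]
        exact ih _ _ (i + 1) rfl hnd' hR' (List.mem_append_left _ hsp)
          (by have := List.length_append (as := queue) (bs := new); omega)
          (by omega)

theorem altDfs_false_sound (B : List (List Int)) (sp : Int × Int) (tx ty : Int) (cap : Nat) :
    ∀ (fuel : Nat) (st sn : List (Int × Int)),
      sn.Nodup → (∀ c ∈ sn, c ∈ pvR B sp (tx, ty)) → sp ∈ sn →
      (∀ c ∈ st, c ∈ sn) →
      (st = [] → sn.length ≤ cap) →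
      (∀ c ∈ sn, c ∉ st → ∀ q, pvAdj c q → pvOk q → [q.1, q.2] ∉ B → q ∈ sn) →
      altDfs B (tx, ty) cap fuel st sn = false →
      (¬((tx, ty) ≠ sp ∧ pvOk (tx, ty) ∧ [tx, ty] ∉ B ∧ ∃ p ∈ pvR B sp (tx, ty), pvAdj p (tx, ty)) ∧
        (pvR B sp (tx, ty)).ncard ≤ cap) := by
  intro fuel
  induction fuel with
  | zero =>
    intro st sn _ _ _ _ _ _ hfalse
    simp [altDfs] at hfalse
  | succ f ih =>
    intro st sn hnd hR hsp hss hemp hclos hfalse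
    cases st with
    | nil =>
      rw [altDfs] at hfalse
      have hclosed : ∀ c ∈ sn, ∀ q, pvAdj c q → pvOk q → [q.1, q.2] ∉ B → q ∈ sn := by
        intro c hc
        exact hclos c hc (by simp)
      have hRsub : ∀ q ∈ pvR B sp (tx, ty), q ∈ sn := by
        intro q hqR
        induction hqR with
        | refl => exact hsp
        | tail hab hbc ihq => exact hclosed _ ihq _ hbc.1 hbc.2.1 hbc.2.2.1
      constructor
      · rintro ⟨hne, hok, hnb, p, hpR, hadj⟩
        have htq : (tx, ty) ∈ sn := hclosed p (hRsub p hpR) _ hadj hok hnb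
        exact pvR_not_tp B sp (tx, ty) hne (hR _ htq)
      · have hb : sn.length ≤ cap := hemp rfl
        have hsub : pvR B sp (tx, ty) ⊆ ↑sn.toFinset := fun q hq => by
          simpa using hRsub q hq
        have h1 := Set.ncard_le_ncard hsub sn.toFinset.finite_toSet
        rw [Set.ncard_coe_finset] at h1
        have h2 : sn.toFinset.card ≤ sn.length := sn.toFinset_card_le
        omega
    | cons c rest =>
      obtain ⟨x0, y0⟩ := c
      rw [altDfs] at hfalse
      have hmem0 : (x0, y0) ∈ sn := hss _ (by simp)
      cases hscan : altScan B (tx, ty) [((x0:Int), y0 - 1), (x0, y0 + 1), (x0 - 1, y0), (x0 + 1, y0)] rest sn with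
      | none => rw [hscan] at hfalse; simp at hfalse
      | some p =>
        obtain ⟨st'', sn'⟩ := p
        rw [hscan] at hfalse
        simp only at hfalse
        obtain ⟨new, hst', hs', hndnew, hprops, hcov⟩ := altScan_some _ _ _ _ _ _ _ hscan
        by_cases hbnd : cap < sn'.length
        · rw [if_pos hbnd] at hfalse; simp at hfalse
        · rw [if_neg hbnd] at hfalse
          subst hst'
          subst hs'
          refine ih _ _ ?_ ?_ ?_ ?_ ?_ ?_ hfalse
          · refine (List.nodup_append).mpr ⟨hndnew, hnd, ?_⟩
            intro a ha b hb rfl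
            exact (hprops a ha).1 hb
          · intro c hc
            rcases List.mem_append.mp hc with hc | hc
            · obtain ⟨h1, h2, h3, h4, h5⟩ := hprops c hc
              exact Relation.ReflTransGen.tail (hR _ hmem0)
                ⟨(mem_nbrsB x0 y0 c).mp h5, h2, h3, h4⟩
            · exact hR c hc
          · exact List.mem_append_right _ hsp
          · intro c hc
            rcases List.mem_append.mp hc with hc | hc
            · exact List.mem_append_left _ hc
            · exact List.mem_append_right _ (hss c (List.mem_cons_of_mem _ hc))
          · intro _; omega
          · intro c hc hnst q hadj hok hnb
            rcases List.mem_append.mp hc with hc | hc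
            · exact absurd (List.mem_append_left _ hc) hnst
            · by_cases hcx : c = (x0, y0)
              · subst hcx
                exact hcov q ((mem_nbrsB _ _ q).mpr hadj) hok hnb
              · have hcr : c ∉ rest := fun hr => hnst (List.mem_append_right _ hr)
                have : c ∉ (x0, y0) :: rest := by
                  intro hm
                  rcases List.mem_cons.mp hm with hm | hm
                  · exact hcx hm
                  · exact hcr hm
                exact List.mem_append_right _ (hclos c hc this q hadj hok hnb)

theorem altDfs_complete (B : List (List Int)) (sp : Int × Int) (tx ty : Int) (cap : Nat)
    (hQ1 : ¬((tx, ty) ≠ sp ∧ pvOk (tx, ty) ∧ [tx, ty] ∉ B ∧ ∃ p ∈ pvR B sp (tx, ty), pvAdj p (tx, ty)))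
    (hQ2 : (pvR B sp (tx, ty)).ncard ≤ cap) :
    ∀ (fuel : Nat) (st sn : List (Int × Int)),
      sn.Nodup → (∀ c ∈ sn, c ∈ pvR B sp (tx, ty)) → sp ∈ sn →
      (∀ c ∈ st, c ∈ sn) →
      st.length + (cap + 1 - sn.length) < fuel →
      altDfs B (tx, ty) cap fuel st sn = false := by
  intro fuel
  induction fuel with
  | zero =>
    intro st sn _ _ _ _ hfuel
    omega
  | succ f ih =>
    intro st sn hnd hR hsp hss hfuel
    cases st with
    | nil => rw [altDfs]
    | cons c rest =>
      obtain ⟨x0, y0⟩ := c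
      rw [altDfs]
      have hmem0 : (x0, y0) ∈ sn := hss _ (by simp)
      cases hscan : altScan B (tx, ty) [((x0:Int), y0 - 1), (x0, y0 + 1), (x0 - 1, y0), (x0 + 1, y0)] rest sn with
      | none =>
        exfalso
        obtain ⟨c, hcn, hok, hnb, hct, hns⟩ := altScan_none _ _ _ _ _ hscan
        subst hct
        apply hQ1
        refine ⟨fun he => hns (he ▸ hsp), hok, by simpa using hnb, (x0, y0), hR _ hmem0,
          (mem_nbrsB x0 y0 _).mp hcn⟩
      | some p =>
        obtain ⟨st'', sn'⟩ := p
        simp only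
        obtain ⟨new, hst', hs', hndnew, hprops, hcov⟩ := altScan_some _ _ _ _ _ _ _ hscan
        subst hst'
        subst hs'
        have hnd' : (new ++ sn).Nodup := by
          refine (List.nodup_append).mpr ⟨hndnew, hnd, ?_⟩
          intro a ha b hb rfl
          exact (hprops a ha).1 hb
        have hR' : ∀ c ∈ new ++ sn, c ∈ pvR B sp (tx, ty) := by
          intro c hc
          rcases List.mem_append.mp hc with hc | hc
          · obtain ⟨h1, h2, h3, h4, h5⟩ := hprops c hc
            exact Relation.ReflTransGen.tail (hR _ hmem0)
              ⟨(mem_nbrsB x0 y0 c).mp h5, h2, h3, h4⟩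
          · exact hR c hc
        have hlen' : (new ++ sn).length ≤ cap :=
          le_trans (pvR_card_of_list B sp (tx, ty) _ hnd' hR') hQ2
        rw [if_neg (by omega)]
        refine ih _ _ hnd' hR' (List.mem_append_right _ hsp) ?_ ?_
        · intro c hc
          rcases List.mem_append.mp hc with hc | hc
          · exact List.mem_append_left _ hc
          · exact List.mem_append_right _ (hss c (List.mem_cons_of_mem _ hc))
        · have h1 : (new ++ rest).length = new.length + rest.length := List.length_append
          have h2 : (new ++ sn).length = new.length + sn.length := List.length_append
          have h3 : (rest.length + 1) + (cap + 1 - sn.length) < f + 1 := by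
            simpa using hfuel
          omega

theorem loopA_eq_altDfs (B : List (List Int)) (sx sy tx ty : Int) (bound : Nat) :
    loopA B tx ty bound (bound + 2) [(sx, sy)] [(sx, sy)] 0 =
      altDfs B (tx, ty) bound (bound + 6) [(sx, sy)] [(sx, sy)] := by
  cases ha : loopA B tx ty bound (bound + 2) [(sx, sy)] [(sx, sy)] 0 with
  | false =>
    obtain ⟨hQ1, hQ2⟩ := loopA_false_sound B (sx, sy) tx ty bound (bound + 2) _ _ 0 rfl
      (by simp) (by intro c hc; simp at hc; subst hc; exact Relation.ReflTransGen.refl)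
      (by simp) (by omega) (by omega) ha
    exact (altDfs_complete B (sx, sy) tx ty bound hQ1 hQ2 (bound + 6) _ _ (by simp)
      (by intro c hc; simp at hc; subst hc; exact Relation.ReflTransGen.refl)
      (by simp) (by intro c hc; simpa using hc) (by simp; omega)).symm
  | true =>
    cases hb : altDfs B (tx, ty) bound (bound + 6) [(sx, sy)] [(sx, sy)] with
    | true => rfl
    | false =>
      obtain ⟨hQ1, hQ2⟩ := altDfs_false_sound B (sx, sy) tx ty bound (bound + 6) _ _
        (by simp) (by intro c hc; simp at hc; subst hc; exact Relation.ReflTransGen.refl)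
        (by simp) (by intro c hc; simpa using hc)
        (by intro h; exact absurd h (by simp))
        (by intro c hc hnc; exact absurd hc hnc) hb
      rw [loopA_complete B (sx, sy) tx ty bound hQ1 hQ2 (bound + 2) _ _ 0 rfl
        (by simp) (by intro c hc; simp at hc; subst hc; exact Relation.ReflTransGen.refl)
        (by simp) (by simp) (by omega)] at ha
      exact ha.symm

-- ===== VERDICT (by name: the statement is the Claim_ definition above) =====
theorem isEscapePossible_lee215_spec : Claim_equal_isEscapePossible_lee215 := by
  intro blocked source target _hdom hpre
  unfold Spec_isEscapePossible_lee215
  obtain ⟨hs, ht⟩ := hpre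
  obtain ⟨sx, sy, rfl⟩ := List.length_eq_two.mp hs
  obtain ⟨tx, ty, rfl⟩ := List.length_eq_two.mp ht
  simp only [isEscapePossible_lee215, isEscapePossible_lee215_alt]
  rw [if_pos (by simp : ([sx, sy] : List Int).length = 2 ∧ ([tx, ty] : List Int).length = 2)]
  simp only [List.getD, List.getElem?_cons_zero, List.getElem?_cons_succ, Option.getD_some]
  rw [loopA_eq_altDfs, loopA_eq_altDfs]
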